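-- pv_equiv track=rewrite | github.com/ianohlander/ACS | docs/legacy-extracted-data/write_rivers_repository.py | idify
-- ===== SOURCE A (Python) =====
-- def slug(value):
--     return (
--         value.lower()
--         .replace("'", "")
--         .replace('"', "")
--         .replace("&", " and ")
--         .replace("/", " ")
--         .replace("-", " ")
--     )
--
-- def idify(value):
--     out = []
--     prev = False
--     for ch in slug(value):
--         if ch.isalnum():
--             out.append(ch)
--             prev = False
--         elif not prev:
--             out.append("_")
--             prev = True
--     return "".join(out).strip("_") or "unknown"
-- ===== SOURCE B (Python) =====
-- def slug(value):
--     return (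
--         value.lower()
--         .replace("'", "")
--         .replace('"', "")
--         .replace("&", " and ")
--         .replace("/", " ")
--         .replace("-", " ")
--     )
--
-- def idify(value):
--     cleaned = ''.join(c if c.isalnum() else ' ' for c in slug(value))
--     return '_'.join(cleaned.split()) or 'unknown'
-- ===== Notes on version B (the rewrite author's own statement) =====
-- stated objective: idiomatic
-- what changed: B replaces A's stateful prev-flag loop (emit one underscore per non-alnum run, then strip edge underscores) by a map-split-join pipeline: map non-alnum chars to spaces, str.split() to get the maximal alnum runs, and join them with underscores.
import Mathlib
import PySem

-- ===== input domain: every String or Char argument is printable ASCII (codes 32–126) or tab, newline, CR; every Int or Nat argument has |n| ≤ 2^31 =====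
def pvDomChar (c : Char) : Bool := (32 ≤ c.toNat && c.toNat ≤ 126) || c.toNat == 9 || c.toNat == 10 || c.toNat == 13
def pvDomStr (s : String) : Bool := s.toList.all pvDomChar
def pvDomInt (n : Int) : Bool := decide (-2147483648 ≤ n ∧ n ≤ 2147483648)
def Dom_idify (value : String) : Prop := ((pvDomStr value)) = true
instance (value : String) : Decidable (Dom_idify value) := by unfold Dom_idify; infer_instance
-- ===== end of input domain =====

-- B replaces A's prev-flag loop by a map→split()→join pipeline over the same slug; objective: idiomatic, same cost.


-- ===== PORT A =====
-- shared helper `slug` (both Pythons use the identical function)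
def pvSlug (value : String) : String :=
  PySem.Str.replace (PySem.Str.replace (PySem.Str.replace (PySem.Str.replace
    (PySem.Str.replace (PySem.Str.lower value) "'" "") "\"" "") "&" " and ") "/" " ") "-" " "

def idify (value : String) : String :=
  let r := (pvSlug value).toList.foldl
    (fun (st : List Char × Bool) ch =>
      if PySem.Chars.isalnum ch then (st.1 ++ [ch], false)
      else if st.2 then st else (st.1 ++ ['_'], true))
    ([], false)
  let t := PySem.Chars.stripChars r.1 ['_']
  if t = [] then "unknown" else String.mk t

-- ===== PORT B =====
def idify_alt (value : String) : String :=
  let cleaned := (pvSlug value).toList.map (fun c => if PySem.Chars.isalnum c then c else ' ')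
  let t := PySem.Chars.join ['_'] (PySem.Chars.split₀ cleaned)
  if t = [] then "unknown" else String.mk t

-- ===== PRECONDITION & SPEC =====
def Spec_idify (value : String) (out : String) : Prop := out = idify_alt value
instance (value : String) (out : String) : Decidable (Spec_idify value out) := by unfold Spec_idify; infer_instance

-- ===== CLAIM (what is proved, stated in full; the proofs are below) =====
def Claim_equal_idify : Prop := ∀ (value : String), Dom_idify value → Spec_idify value (idify value)


-- ===== LEMMAS AND PROOFS =====

def outA : List Char → Bool → List Char
  | [], _ => []
  | c :: cs, prev =>
    if PySem.Chars.isalnum c then c :: outA cs false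
    else if prev then outA cs prev else '_' :: outA cs true

def prevA : List Char → Bool → Bool
  | [], prev => prev
  | c :: cs, _ => if PySem.Chars.isalnum c then prevA cs false else prevA cs true

def fCh (c : Char) : Char := if PySem.Chars.isalnum c then c else ' '

def HeadP (cs : List Char) : Prop := ∀ c, cs.head? = some c → PySem.Chars.isalnum c = true

def tailMark (cs : List Char) : List Char :=
  match cs.getLast? with
  | some c => if PySem.Chars.isalnum c then [] else ['_']
  | none => []

-- A's loop as forward recursion, and run/word characterisations of both sides

lemma foldl_core (cs : List Char) (acc : List Char) (prev : Bool) :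
    cs.foldl (fun (st : List Char × Bool) ch =>
      if PySem.Chars.isalnum ch then (st.1 ++ [ch], false)
      else if st.2 then st else (st.1 ++ ['_'], true)) (acc, prev)
    = (acc ++ outA cs prev, prevA cs prev) := by
  induction cs generalizing acc prev with
  | nil => simp [outA, prevA]
  | cons c cs ih =>
    by_cases h : PySem.Chars.isalnum c = true
    · simp [outA, prevA, h, ih]
    · cases prev <;> simp [outA, prevA, h, ih]

lemma alnum_not_space (c : Char) (h : PySem.Chars.isalnum c = true) :
    PySem.Chars.isspace c = false := by
  have l1 : ∀ (a b : Char), a ≤ b → a.toNat ≤ b.toNat := by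
    intro a b hab
    rw [Char.le_def] at hab
    exact (UInt32.le_iff_toNat_le).mp hab
  have hb : 48 ≤ c.toNat ∧ c.toNat ≤ 122 := by
    simp only [PySem.Chars.isalnum, PySem.Chars.isalpha, PySem.Chars.isdigit,
      PySem.Chars.isupper, PySem.Chars.islower, Bool.or_eq_true, Bool.and_eq_true,
      decide_eq_true_eq] at h
    have e1 : ('A').toNat = 65 := by decide
    have e2 : ('Z').toNat = 90 := by decide
    have e3 : ('a').toNat = 97 := by decide
    have e4 : ('z').toNat = 122 := by decide
    have e5 : ('0').toNat = 48 := by decide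
    have e6 : ('9').toNat = 57 := by decide
    rcases h with (⟨h1, h2⟩ | ⟨h1, h2⟩) | ⟨h1, h2⟩ <;>
      [have a1 := l1 _ _ h1; have a1 := l1 _ _ h1; have a1 := l1 _ _ h1] <;>
      [have a2 := l1 _ _ h2; have a2 := l1 _ _ h2; have a2 := l1 _ _ h2] <;>
      omega
  simp only [PySem.Chars.isspace]
  simp only [Bool.or_eq_false_iff, Bool.and_eq_false_iff, decide_eq_false_iff_not]
  omega

lemma alnum_ne_underscore (c : Char) (h : PySem.Chars.isalnum c = true) : c ≠ '_' := by
  rintro rfl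
  simp [PySem.Chars.isalnum, PySem.Chars.isalpha, PySem.Chars.isdigit,
    PySem.Chars.isupper, PySem.Chars.islower] at h

lemma space_sp : PySem.Chars.isspace ' ' = true := by decide

lemma outA_alnum_run (w rest : List Char) (prev : Bool) (hw : w ≠ [])
    (h : ∀ c ∈ w, PySem.Chars.isalnum c = true) :
    outA (w ++ rest) prev = w ++ outA rest false := by
  induction w generalizing prev with
  | nil => exact absurd rfl hw
  | cons c w ih =>
    have hc := h c (by simp)
    rcases Decidable.em (w = []) with rfl | hne
    · simp [outA, hc]
    · simp only [List.cons_append, outA, hc, if_pos]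
      rw [ih false hne (fun c hc => h c (by simp [hc]))]

lemma outA_true_skip (u rest : List Char) (h : ∀ c ∈ u, PySem.Chars.isalnum c = false) :
    outA (u ++ rest) true = outA rest true := by
  induction u with
  | nil => rfl
  | cons c u ih =>
    have hc := h c (by simp)
    simp only [List.cons_append, outA, hc]
    exact ih (fun c hc => h c (by simp [hc]))

lemma outA_nonalnum_run (u rest : List Char) (hu : u ≠ [])
    (h : ∀ c ∈ u, PySem.Chars.isalnum c = false) :
    outA (u ++ rest) false = '_' :: outA rest true := by
  cases u with
  | nil => exact absurd rfl hu
  | cons c u =>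
    have hc := h c (by simp)
    simp only [List.cons_append, outA, hc]
    rw [outA_true_skip u rest (fun c hc => h c (by simp [hc]))]
    simp

lemma outA_true_eq_false (cs : List Char) (h : HeadP cs) : outA cs true = outA cs false := by
  cases cs with
  | nil => rfl
  | cons c cs => have hc := h c rfl; simp [outA, hc]

lemma go_nil (cur : List Char) (acc : List (List Char)) :
    PySem.Chars.split₀.go [] cur acc
      = if cur.isEmpty then acc.reverse else (cur.reverse :: acc).reverse := by
  simp [PySem.Chars.split₀.go]

lemma go_cons (c : Char) (rest cur : List Char) (acc : List (List Char)) :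
    PySem.Chars.split₀.go (c :: rest) cur acc
      = if PySem.Chars.isspace c then
          (if cur.isEmpty then PySem.Chars.split₀.go rest [] acc
           else PySem.Chars.split₀.go rest [] (cur.reverse :: acc))
        else PySem.Chars.split₀.go rest (c :: cur) acc := by
  rw [PySem.Chars.split₀.go]

lemma go_acc (l : List Char) : ∀ (cur : List Char) (acc : List (List Char)),
    PySem.Chars.split₀.go l cur acc = acc.reverse ++ PySem.Chars.split₀.go l cur [] := by
  induction l with
  | nil =>
    intro cur acc
    rw [go_nil, go_nil]
    cases cur <;> simp
  | cons c rest ih =>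
    intro cur acc
    rw [go_cons, go_cons]
    by_cases hs : PySem.Chars.isspace c = true
    · simp only [hs, if_true]
      cases cur with
      | nil => simpa using ih [] acc
      | cons d cur' =>
        simp only [List.isEmpty_cons, Bool.false_eq_true, if_false]
        rw [ih [] (((d :: cur').reverse) :: acc), ih [] [((d :: cur').reverse)]]
        simp
    · simp only [hs, if_false, Bool.false_eq_true]
      exact ih _ _

lemma go_space_run (sp : List Char) : ∀ (l : List Char) (acc : List (List Char)),
    (∀ c ∈ sp, PySem.Chars.isspace c = true) →
    PySem.Chars.split₀.go (sp ++ l) [] acc = PySem.Chars.split₀.go l [] acc := by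
  induction sp with
  | nil => intro l acc _; rfl
  | cons c sp ih =>
    intro l acc h
    rw [List.cons_append, go_cons]
    simp only [h c (by simp), if_true, List.isEmpty_nil]
    exact ih l acc (fun d hd => h d (by simp [hd]))

lemma go_word_run (w : List Char) : ∀ (l cur : List Char) (acc : List (List Char)),
    (∀ c ∈ w, PySem.Chars.isspace c = false) →
    PySem.Chars.split₀.go (w ++ l) cur acc = PySem.Chars.split₀.go l (w.reverse ++ cur) acc := by
  induction w with
  | nil => intro l cur acc _; rfl
  | cons c w ih =>
    intro l cur acc h
    rw [List.cons_append, go_cons]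
    simp only [h c (by simp), Bool.false_eq_true, if_false]
    rw [ih l (c :: cur) acc (fun d hd => h d (by simp [hd]))]
    simp

lemma split₀_word (w l : List Char) (hw : w ≠ [])
    (hnw : ∀ c ∈ w, PySem.Chars.isspace c = false)
    (hl : ∀ c, l.head? = some c → PySem.Chars.isspace c = true) :
    PySem.Chars.split₀ (w ++ l) = w :: PySem.Chars.split₀ l := by
  unfold PySem.Chars.split₀
  rw [go_word_run w l [] [] hnw]
  cases l with
  | nil =>
    rw [go_nil]
    cases w with
    | nil => exact absurd rfl hw
    | cons a t => simp [go_nil]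
  | cons d r =>
    have hd := hl d rfl
    have hrhs : PySem.Chars.split₀.go (d :: r) [] [] = PySem.Chars.split₀.go r [] [] := by
      rw [go_cons]
      simp [hd]
    rw [hrhs, go_cons]
    have hne : (w.reverse ++ []).isEmpty = false := by
      cases w with | nil => exact absurd rfl hw | cons a t => simp
    simp only [hd, if_true, hne, Bool.false_eq_true, if_false]
    rw [go_acc]
    simp

lemma ic_single (sep w : List Char) : List.intercalate sep [w] = w := by
  simp [List.intercalate]

lemma ic_cons2 (sep w v : List Char) (W : List (List Char)) :
    List.intercalate sep (w :: v :: W) = w ++ sep ++ List.intercalate sep (v :: W) := by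
  simp [List.intercalate, List.intersperse]

lemma go_words (l : List Char) : ∀ (cur : List Char) (acc : List (List Char)),
    (∀ c ∈ l, PySem.Chars.isspace c = false → PySem.Chars.isalnum c = true) →
    (∀ c ∈ cur, PySem.Chars.isalnum c = true) →
    (∀ w ∈ acc, w ≠ [] ∧ ∀ c ∈ w, PySem.Chars.isalnum c = true) →
    ∀ w ∈ PySem.Chars.split₀.go l cur acc, w ≠ [] ∧ ∀ c ∈ w, PySem.Chars.isalnum c = true := by
  induction l with
  | nil =>
    intro cur acc _ hcur hacc w hw
    rw [go_nil] at hw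
    by_cases hc : cur.isEmpty = true
    · simp only [hc, if_true, List.mem_reverse] at hw
      exact hacc w hw
    · simp only [hc, Bool.false_eq_true, if_false, List.mem_reverse, List.mem_cons] at hw
      rcases hw with rfl | hw
      · constructor
        · simp [List.isEmpty_iff] at hc; simpa using hc
        · intro c hc'; exact hcur c (by simpa using hc')
      · exact hacc w hw
  | cons c rest ih =>
    intro cur acc hl hcur hacc w hw
    rw [go_cons] at hw
    by_cases hs : PySem.Chars.isspace c = true
    · simp only [hs, if_true] at hw
      by_cases hc : cur.isEmpty = true
      · simp only [hc, if_true] at hw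
        exact ih [] acc (fun d hd => hl d (by simp [hd])) (by simp) hacc w hw
      · simp only [hc, Bool.false_eq_true, if_false] at hw
        refine ih [] (cur.reverse :: acc) (fun d hd => hl d (by simp [hd])) (by simp) ?_ w hw
        intro v hv
        rcases List.mem_cons.mp hv with rfl | hv
        · refine ⟨by simpa [List.isEmpty_iff] using hc, ?_⟩
          intro d hd; exact hcur d (by simpa using hd)
        · exact hacc v hv
    · simp only [hs, Bool.false_eq_true, if_false] at hw
      refine ih (c :: cur) acc (fun d hd => hl d (by simp [hd])) ?_ hacc w hw
      intro d hd
      rcases List.mem_cons.mp hd with rfl | hd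
      · exact hl d (by simp) (by simpa using hs)
      · exact hcur d hd

lemma join_head (W : List (List Char)) (hW : W ≠ [])
    (h : ∀ w ∈ W, w ≠ [] ∧ ∀ c ∈ w, PySem.Chars.isalnum c = true) :
    ∃ c t, PySem.Chars.join ['_'] W = c :: t ∧ PySem.Chars.isalnum c = true := by
  cases W with
  | nil => exact absurd rfl hW
  | cons w W' =>
    obtain ⟨hne, hall⟩ := h w (by simp)
    cases w with
    | nil => exact absurd rfl hne
    | cons a t =>
      cases W' with
      | nil =>
        exact ⟨a, t, by simp [PySem.Chars.join, ic_single], hall a (by simp)⟩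
      | cons v W'' =>
        refine ⟨a, t ++ ['_'] ++ List.intercalate ['_'] (v :: W''), ?_, hall a (by simp)⟩
        simp [PySem.Chars.join, ic_cons2]

lemma join_last (W : List (List Char)) (hW : W ≠ [])
    (h : ∀ w ∈ W, w ≠ [] ∧ ∀ c ∈ w, PySem.Chars.isalnum c = true) :
    ∃ c, (PySem.Chars.join ['_'] W).getLast? = some c ∧ PySem.Chars.isalnum c = true := by
  induction W with
  | nil => exact absurd rfl hW
  | cons w W' ih =>
    obtain ⟨hne, hall⟩ := h w (by simp)
    cases W' with
    | nil =>
      refine ⟨w.getLast hne, ?_, hall _ (List.getLast_mem hne)⟩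
      simp [PySem.Chars.join, ic_single, List.getLast?_eq_getLast, hne]
    | cons v W'' =>
      obtain ⟨c, hc, hcal⟩ := ih (by simp) (fun u hu => h u (by simp [hu]))
      obtain ⟨d, s, hds, _⟩ := join_head (v :: W'') (by simp) (fun u hu => h u (by simp [hu]))
      refine ⟨c, ?_, hcal⟩
      have : PySem.Chars.join ['_'] (w :: v :: W'') = (w ++ ['_']) ++ PySem.Chars.join ['_'] (v :: W'') := by
        simp [PySem.Chars.join, ic_cons2]
      rw [this, List.getLast?_append_of_ne_nil, hc]
      rw [hds]; simp

lemma strip_underscore_cons (x : List Char) :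
    PySem.Chars.stripChars ('_' :: x) ['_'] = PySem.Chars.stripChars x ['_'] := by
  simp only [PySem.Chars.stripChars]
  rw [List.dropWhile_cons_of_pos (by decide)]

lemma strip_join (J tl : List Char) (htl : tl = [] ∨ tl = ['_'])
    (hJ : J = [] ∨ (∃ c t, J = c :: t ∧ c ≠ '_') ∧ (∃ c, J.getLast? = some c ∧ c ≠ '_')) :
    PySem.Chars.stripChars (J ++ tl) ['_'] = J := by
  rcases hJ with rfl | ⟨⟨hd, t, rfl, hhd⟩, ⟨c, hc, hcne⟩⟩
  · rcases htl with rfl | rfl <;> decide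
  · simp only [PySem.Chars.stripChars]
    rw [List.cons_append, List.dropWhile_cons_of_neg (by simp [hhd])]
    have hrev : ((hd :: t) ++ tl).reverse = tl ++ (hd :: t).reverse := by
      rcases htl with rfl | rfl <;> simp
    rw [← List.cons_append, hrev]
    have hdrop : List.dropWhile (fun c => (['_'].contains c)) (tl ++ (hd :: t).reverse)
        = List.dropWhile (fun c => (['_'].contains c)) ((hd :: t).reverse) := by
      rcases htl with rfl | rfl
      · simp
      · rw [List.cons_append, List.nil_append, List.dropWhile_cons_of_pos (by decide)]
    rw [hdrop]
    have hhead : ((hd :: t).reverse).head? = some c := by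
      rw [List.head?_reverse]; exact hc
    cases hrv : (hd :: t).reverse with
    | nil => simp at hrv
    | cons a s =>
      rw [hrv] at hhead
      have : a = c := by simpa using hhead
      subst this
      rw [List.dropWhile_cons_of_neg (by simp [hcne]), ← hrv, List.reverse_reverse]

lemma head_dropWhile_false (p : Char → Bool) (l : List Char) (a : Char)
    (h : (l.dropWhile p).head? = some a) : p a = false := by
  induction l with
  | nil => simp at h
  | cons c cs ih =>
    rw [List.dropWhile_cons] at h
    split at h
    · exact ih h
    · next hb => simp at h; subst h; simpa using hb

lemma main_runs : ∀ (n : ℕ) (cs : List Char), cs.length ≤ n → HeadP cs →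
    outA cs false = PySem.Chars.join ['_'] (PySem.Chars.split₀ (cs.map fCh)) ++ tailMark cs := by
  intro n
  induction n with
  | zero =>
    intro cs hlen _
    have h0 : cs = [] := List.eq_nil_of_length_eq_zero (Nat.le_zero.mp hlen)
    subst h0; decide
  | succ n ih =>
    intro cs hlen hhead
    cases cs with
    | nil => decide
    | cons c cs' =>
      have hc : PySem.Chars.isalnum c = true := hhead c rfl
      -- w = leading alnum run, r = rest
      obtain ⟨w, r, hwr, hwne, hwall, hrhead⟩ :
          ∃ w r, c :: cs' = w ++ r ∧ w ≠ [] ∧ (∀ d ∈ w, PySem.Chars.isalnum d = true) ∧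
            (∀ d, r.head? = some d → PySem.Chars.isalnum d = false) := by
        refine ⟨List.takeWhile PySem.Chars.isalnum (c :: cs'),
                List.dropWhile PySem.Chars.isalnum (c :: cs'),
                (List.takeWhile_append_dropWhile).symm, ?_, ?_, ?_⟩
        · simp [List.takeWhile_cons, hc]
        · exact fun d hd => List.mem_takeWhile_imp hd
        · exact fun d hd => head_dropWhile_false _ _ _ hd
      rw [hwr]
      have hmapw : w.map fCh = w := by
        have : ∀ d ∈ w, fCh d = id d := by
          intro d hd; simp [fCh, hwall d hd]
        rw [List.map_congr_left this, List.map_id]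
      have hwnspace : ∀ d ∈ w, PySem.Chars.isspace d = false :=
        fun d hd => alnum_not_space d (hwall d hd)
      have houtw : outA (w ++ r) false = w ++ outA r false := outA_alnum_run w r false hwne hwall
      have hsplitw : PySem.Chars.split₀ ((w ++ r).map fCh)
          = w :: PySem.Chars.split₀ (r.map fCh) := by
        rw [List.map_append, hmapw]
        refine split₀_word w (r.map fCh) hwne hwnspace ?_
        intro d hd
        cases r with
        | nil => simp at hd
        | cons e r' =>
          simp only [List.map_cons, List.head?_cons, Option.some.injEq] at hd
          have he : PySem.Chars.isalnum e = false := hrhead e rfl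
          rw [← hd]; simp [fCh, he, space_sp]
      cases hr0 : r with
      | nil =>
        subst hr0
        rw [houtw, hsplitw]
        have hlast : tailMark (w ++ []) = [] := by
          cases hwl : w.getLast? with
          | none => simp [List.getLast?_eq_none_iff] at hwl; exact absurd hwl hwne
          | some a =>
            have ha : a ∈ w := List.mem_of_getLast? hwl
            simp [tailMark, hwl, hwall a ha]
        rw [hlast]
        simp [PySem.Chars.split₀, PySem.Chars.join, ic_single, outA,
          PySem.Chars.split₀.go]
      | cons e r' =>
        subst hr0
        -- u = nonalnum run of r, cs₂ = rest
        obtain ⟨u, cs₂, hur, hune, hual, h2head⟩ :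
            ∃ u cs₂, e :: r' = u ++ cs₂ ∧ u ≠ [] ∧ (∀ d ∈ u, PySem.Chars.isalnum d = false) ∧
              HeadP cs₂ := by
          refine ⟨List.takeWhile (fun d => !PySem.Chars.isalnum d) (e :: r'),
                  List.dropWhile (fun d => !PySem.Chars.isalnum d) (e :: r'),
                  (List.takeWhile_append_dropWhile).symm, ?_, ?_, ?_⟩
          · have he : PySem.Chars.isalnum e = false := hrhead e rfl
            simp [List.takeWhile_cons, he]
          · intro d hd
            have := List.mem_takeWhile_imp hd
            simpa using this
          · intro d hd
            have := head_dropWhile_false _ _ _ hd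
            simpa using this
        rw [hur] at houtw hsplitw ⊢
        have houtu : outA (u ++ cs₂) false = '_' :: outA cs₂ false := by
          rw [outA_nonalnum_run u cs₂ hune hual, outA_true_eq_false cs₂ h2head]
        have hsplitu : PySem.Chars.split₀ ((u ++ cs₂).map fCh)
            = PySem.Chars.split₀ (cs₂.map fCh) := by
          rw [List.map_append]
          unfold PySem.Chars.split₀
          refine go_space_run (u.map fCh) (cs₂.map fCh) [] ?_
          intro d hd
          obtain ⟨d', hd', rfl⟩ := List.mem_map.mp hd
          simp [fCh, hual d' hd', space_sp]
        have hlen2 : cs₂.length ≤ n := by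
          have := congrArg List.length hwr
          rw [hur] at this
          simp at this
          have hl := hlen
          simp at hl
          have hwlen : 1 ≤ w.length := by
            cases w with | nil => exact absurd rfl hwne | cons _ _ => simp
          have hulen : 1 ≤ u.length := by
            cases u with | nil => exact absurd rfl hune | cons _ _ => simp
          omega
        have hIH := ih cs₂ hlen2 h2head
        rw [houtw, houtu, hsplitw, hsplitu, hIH]
        cases hcs2 : cs₂ with
        | nil =>
          subst hcs2
          have hW2 : PySem.Chars.split₀ (([] : List Char).map fCh) = [] := by decide
          rw [hW2]
          have hlastu : tailMark (w ++ (u ++ [])) = ['_'] := by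
            have : (w ++ (u ++ ([] : List Char))).getLast? = u.getLast? := by
              rw [List.append_nil]
              exact List.getLast?_append_of_ne_nil w hune
            cases hul : u.getLast? with
            | none => simp [List.getLast?_eq_none_iff] at hul; exact absurd hul hune
            | some a =>
              have ha : a ∈ u := List.mem_of_getLast? hul
              simp [tailMark, this, hul, hual a ha]
          rw [hlastu]
          simp only [tailMark, PySem.Chars.join, ic_single, outA]
          have : List.intercalate ['_'] ([] : List (List Char)) = [] := by decide
          simp [this]
        | cons c₂ t₂ =>
          have hne2 : cs₂ ≠ [] := by rw [hcs2]; simp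
          have hW2ne : PySem.Chars.split₀ (cs₂.map fCh) ≠ [] := by
            intro hW2
            rw [hW2] at hIH
            have hc2 : PySem.Chars.isalnum c₂ = true := by
              rw [hcs2] at h2head; exact h2head c₂ rfl
            rw [hcs2] at hIH
            simp only [outA, hc2, if_pos] at hIH
            have hj0 : PySem.Chars.join ['_'] ([] : List (List Char)) = [] := by decide
            rw [hj0, List.nil_append] at hIH
            unfold tailMark at hIH
            rcases h : (c₂ :: t₂).getLast? with _ | a <;> rw [h] at hIH
            · simp at hIH
            · by_cases hpa : PySem.Chars.isalnum a = true <;> simp [hpa] at hIH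
              have : c₂ = '_' := hIH.1
              subst this
              simp [PySem.Chars.isalnum, PySem.Chars.isalpha, PySem.Chars.isdigit,
                PySem.Chars.isupper, PySem.Chars.islower] at hc2
          cases hW2 : PySem.Chars.split₀ (cs₂.map fCh) with
          | nil => exact absurd hW2 hW2ne
          | cons v W'' =>
            have hjoin : PySem.Chars.join ['_'] (w :: v :: W'')
                = w ++ ['_'] ++ PySem.Chars.join ['_'] (v :: W'') := by
              simp [PySem.Chars.join, ic_cons2]
            have htm : tailMark (w ++ (u ++ cs₂)) = tailMark cs₂ := by
              unfold tailMark
              rw [List.getLast?_append_of_ne_nil w (by simp [hne2]),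
                  List.getLast?_append_of_ne_nil u hne2]
            rw [← hcs2, hW2, hjoin, htm]
            simp

lemma tailMark_cases (cs : List Char) : tailMark cs = [] ∨ tailMark cs = ['_'] := by
  unfold tailMark
  rcases cs.getLast? with _ | a
  · left; rfl
  · by_cases h : PySem.Chars.isalnum a = true <;> simp [h]

lemma words_ok (cs : List Char) :
    ∀ w ∈ PySem.Chars.split₀ (cs.map fCh), w ≠ [] ∧ ∀ c ∈ w, PySem.Chars.isalnum c = true := by
  refine go_words (cs.map fCh) [] [] ?_ (by simp) (by simp)
  intro c hc hns
  obtain ⟨d, _, rfl⟩ := List.mem_map.mp hc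
  by_cases hp : PySem.Chars.isalnum d = true
  · simpa [fCh, hp] using hp
  · exfalso; simp [fCh, hp, space_sp] at hns

lemma core_headP (cs : List Char) (h : HeadP cs) :
    PySem.Chars.stripChars (outA cs false) ['_']
      = PySem.Chars.join ['_'] (PySem.Chars.split₀ (cs.map fCh)) := by
  rw [main_runs cs.length cs le_rfl h]
  refine strip_join _ _ (tailMark_cases cs) ?_
  cases hW : PySem.Chars.split₀ (cs.map fCh) with
  | nil => left; simp [PySem.Chars.join, List.intercalate]
  | cons v W' =>
    right
    have hwords := words_ok cs
    rw [hW] at hwords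
    constructor
    · obtain ⟨c, t, hct, hal⟩ := join_head (v :: W') (by simp) hwords
      exact ⟨c, t, hct, alnum_ne_underscore c hal⟩
    · obtain ⟨c, hc, hal⟩ := join_last (v :: W') (by simp) hwords
      exact ⟨c, hc, alnum_ne_underscore c hal⟩

lemma core_eq (cs : List Char) :
    PySem.Chars.stripChars (outA cs false) ['_']
      = PySem.Chars.join ['_'] (PySem.Chars.split₀ (cs.map fCh)) := by
  obtain ⟨u, cs₁, huc, hual, h1⟩ :
      ∃ u cs₁, cs = u ++ cs₁ ∧ (∀ d ∈ u, PySem.Chars.isalnum d = false) ∧ HeadP cs₁ := by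
    refine ⟨List.takeWhile (fun d => !PySem.Chars.isalnum d) cs,
            List.dropWhile (fun d => !PySem.Chars.isalnum d) cs,
            (List.takeWhile_append_dropWhile).symm, ?_, ?_⟩
    · intro d hd; simpa using List.mem_takeWhile_imp hd
    · intro d hd; simpa using head_dropWhile_false _ _ _ hd
  subst huc
  have hsplit : PySem.Chars.split₀ ((u ++ cs₁).map fCh) = PySem.Chars.split₀ (cs₁.map fCh) := by
    rw [List.map_append]
    unfold PySem.Chars.split₀
    refine go_space_run (u.map fCh) (cs₁.map fCh) [] ?_
    intro d hd
    obtain ⟨d', hd', rfl⟩ := List.mem_map.mp hd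
    simp [fCh, hual d' hd', space_sp]
  rw [hsplit]
  cases hu : u with
  | nil => simpa using core_headP cs₁ h1
  | cons a u' =>
    rw [← hu, outA_nonalnum_run u cs₁ (by rw [hu]; simp) hual, outA_true_eq_false cs₁ h1,
        strip_underscore_cons]
    exact core_headP cs₁ h1

-- ===== VERDICT (by name: the statement is the Claim_ definition above) =====
theorem idify_spec : Claim_equal_idify := by
  intro value _
  unfold Spec_idify idify idify_alt
  simp only [foldl_core, List.nil_append]
  have hmap : (pvSlug value).toList.map (fun c => if PySem.Chars.isalnum c then c else ' ')
      = (pvSlug value).toList.map fCh := by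
    simp [fCh]
  rw [hmap, core_eq]
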